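-- pv_equiv track=rewrite | github.com/thisishwan2/Algorithm | programmers/부대복귀.py | solution
-- ===== SOURCE A (Python) =====
-- from collections import deque
--
-- def solution(n, roads, sources, destination):
--     # roads를 원하는 2차원 배열로 재배치
--     graph=[[] for _ in range(n+1)]
--
--     for x,y in roads:
--         graph[x].append(y)
--         graph[y].append(x)
--
--     # destination으로 부터 각 지점까지의 최소 거리를 구하기
--     visited=[-1 for i in range(n+1)]
--     visited[destination]=0
--     q=deque()
--     q.append(destination)
--
--     while q:
--         x = q.popleft()
--
--         for next in graph[x]:
--             if visited[next]==-1: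
--                 visited[next]=visited[x]+1
--                 q.append(next)
--
--     # sources에 있는 값만 answer로 넣기
--     answer = []
--     for i in sources:
--         answer.append(visited[i])
--
--     return answer
-- ===== SOURCE B (Python) =====
-- def solution(n, roads, sources, destination):
--     # Per-level edge relaxation over the raw roads list: no adjacency structure, no queue.
--     visited = [-1] * (n + 1)
--     visited[destination] = 0
--     d = 0
--     progress = True
--     while progress:
--         progress = False
--         for a, b in roads:
--             if visited[a] == d and visited[b] == -1:
--                 visited[b] = d + 1
--                 progress = True
--             if visited[b] == d and visited[a] == -1:
--                 visited[a] = d + 1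
--                 progress = True
--         d += 1
--     return [visited[i] for i in sources]
-- ===== Notes on version B (the rewrite author's own statement) =====
-- stated objective: alternative
-- what changed: Replaced the adjacency-list + deque BFS by per-level edge relaxation over the raw roads list: no adjacency structure and no queue are built; each round scans all roads and labels every unvisited endpoint adjacent to a level-d node with d+1, repeating until a round makes no progress.
import Mathlib
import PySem

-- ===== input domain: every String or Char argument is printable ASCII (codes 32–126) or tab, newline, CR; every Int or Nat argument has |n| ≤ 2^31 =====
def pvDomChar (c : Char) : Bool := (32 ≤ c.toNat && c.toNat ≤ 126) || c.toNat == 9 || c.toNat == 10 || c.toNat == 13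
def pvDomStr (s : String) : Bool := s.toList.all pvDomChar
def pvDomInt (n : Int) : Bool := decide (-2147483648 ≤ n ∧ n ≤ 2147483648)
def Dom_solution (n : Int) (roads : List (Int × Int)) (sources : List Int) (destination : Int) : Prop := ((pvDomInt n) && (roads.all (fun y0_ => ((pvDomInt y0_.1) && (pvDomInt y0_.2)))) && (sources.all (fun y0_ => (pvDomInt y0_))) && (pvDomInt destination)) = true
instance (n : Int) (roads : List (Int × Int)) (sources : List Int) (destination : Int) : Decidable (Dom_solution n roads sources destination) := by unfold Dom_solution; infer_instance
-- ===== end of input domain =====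

-- B replaces A's adjacency-list + deque BFS by per-level edge relaxation over the raw roads list
-- (no adjacency structure, no queue); equal distances, a different algorithm of higher edge cost.


-- ===== PORT A =====
-- graph = [[] for _ in range(n+1)]; for x,y in roads: graph[x].append(y); graph[y].append(x)
-- (Python list indexing, incl. negative-index wraparound, is exact via PySem.List.pyGetD/pySetD under Pre_)
def pvBuildGraph (n : Int) (roads : List (Int × Int)) : List (List Int) :=
  roads.foldl (fun g p =>
    let g1 := PySem.List.pySetD g p.1 (PySem.List.pyGetD g p.1 [] ++ [p.2])
    PySem.List.pySetD g1 p.2 (PySem.List.pyGetD g1 p.2 [] ++ [p.1]))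
  (List.replicate (n + 1).toNat [])

-- A's inner loop body: for next in graph[x]: if visited[next]==-1: visited[next]=visited[x]+1; enqueue
def pvInnerA (x : Int) (s : List Int × List Int) (nbs : List Int) : List Int × List Int :=
  nbs.foldl (fun s nxt =>
    if PySem.List.pyGetD s.1 nxt 0 = -1 then
      (PySem.List.pySetD s.1 nxt (PySem.List.pyGetD s.1 x 0 + 1), s.2 ++ [nxt])
    else s) s

def pvStepA (graph : List (List Int)) (v : List Int) (x : Int) : List Int × List Int :=
  pvInnerA x (v, []) (PySem.List.pyGetD graph x [])

-- while q: x = q.popleft(); …  (fuel only bounds the number of pops; it is provably never exhausted under Pre_)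
def pvLoopA (graph : List (List Int)) : Nat → List Int → List Int → List Int
  | 0, v, _ => v
  | _ + 1, v, [] => v
  | f + 1, v, x :: q =>
      let s := pvStepA graph v x
      pvLoopA graph f s.1 (q ++ s.2)

def solution (n : Int) (roads : List (Int × Int)) (sources : List Int) (destination : Int) : List Int :=
  let graph := pvBuildGraph n roads
  let visited := PySem.List.pySetD (List.replicate (n + 1).toNat (-1 : Int)) destination 0
  let fin := pvLoopA graph ((n + 1).toNat + 2) visited [destination]
  sources.foldl (fun acc i => acc ++ [PySem.List.pyGetD fin i (-1)]) []

-- ===== PORT B =====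
-- one road's relaxation: if visited[a]==d and visited[b]==-1: visited[b]=d+1; progress=True  (and symmetric)
def pvRelaxStep (d : Int) (s : List Int × Bool) (p : Int × Int) : List Int × Bool :=
  let s1 := if PySem.List.pyGetD s.1 p.1 0 = d ∧ PySem.List.pyGetD s.1 p.2 0 = -1 then
              (PySem.List.pySetD s.1 p.2 (d + 1), true)
            else s
  if PySem.List.pyGetD s1.1 p.2 0 = d ∧ PySem.List.pyGetD s1.1 p.1 0 = -1 then
    (PySem.List.pySetD s1.1 p.1 (d + 1), true)
  else s1

-- while progress: progress=False; for a,b in roads: …; d += 1   (fuel bounds rounds; never exhausted under Pre_)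
def pvLoopR (roads : List (Int × Int)) : Nat → List Int → Int → List Int
  | 0, v, _ => v
  | f + 1, v, d =>
      let s := roads.foldl (pvRelaxStep d) (v, false)
      if s.2 then pvLoopR roads f s.1 (d + 1) else s.1

def solution_alt (n : Int) (roads : List (Int × Int)) (sources : List Int) (destination : Int) : List Int :=
  let visited := PySem.List.pySetD (List.replicate (n + 1).toNat (-1 : Int)) destination 0
  let fin := pvLoopR roads ((n + 1).toNat + 2) visited 0
  sources.map (fun i => PySem.List.pyGetD fin i (-1))

-- ===== PRECONDITION & SPEC =====
-- Pre_ = exactly the inputs where Python A returns (no IndexError): every road endpoint, every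
-- source and the destination must be a valid (possibly negative) index into the n+1 lists.
def Pre_solution (n : Int) (roads : List (Int × Int)) (sources : List Int) (destination : Int) : Prop :=
  (∀ p ∈ roads, PySem.Raise.InRange (n + 1).toNat p.1 ∧ PySem.Raise.InRange (n + 1).toNat p.2) ∧
  PySem.Raise.InRange (n + 1).toNat destination ∧
  (∀ s ∈ sources, PySem.Raise.InRange (n + 1).toNat s)

instance (n : Int) (roads : List (Int × Int)) (sources : List Int) (destination : Int) : Decidable (Pre_solution n roads sources destination) := by unfold Pre_solution; infer_instance

def pvWitness_solution : Int × (List (Int × Int)) × List Int × Int := (3, [(1, 2), (2, 3)], [1, 3], 2)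

def Spec_solution (n : Int) (roads : List (Int × Int)) (sources : List Int) (destination : Int) (out : List Int) : Prop := out = solution_alt n roads sources destination
instance (n : Int) (roads : List (Int × Int)) (sources : List Int) (destination : Int) (out : List Int) : Decidable (Spec_solution n roads sources destination out) := by unfold Spec_solution; infer_instance

-- ===== CLAIM (what is proved, stated in full; the proofs are below) =====
def Claim_equal_solution : Prop := ∀ (n : Int) (roads : List (Int × Int)) (sources : List Int) (destination : Int), Dom_solution n roads sources destination → Pre_solution n roads sources destination → Spec_solution n roads sources destination (solution n roads sources destination)

-- ===== LEMMAS AND PROOFS =====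

-- Python's normalized list index (the Nat cell a wrapping index i addresses)
def pvNorm (L : Nat) (i : Int) : Nat := if 0 ≤ i then i.toNat else L - (-i).toNat

-- number of -1 cells (the BFS termination measure)
def pvCN (v : List Int) : Nat := v.countP (fun a => a == -1)

-- proof-only intermediate: the level-synchronized BFS (frontier per round), used to bridge
-- A's queue BFS and B's edge relaxation
def pvInnerB (dist : Int) (s : List Int × List Int) (nbs : List Int) : List Int × List Int :=
  nbs.foldl (fun s nb =>
    if PySem.List.pyGetD s.1 nb 0 = -1 then
      (PySem.List.pySetD s.1 nb dist, s.2 ++ [nb])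
    else s) s

def pvPassB (graph : List (List Int)) (dist : Int) (s : List Int × List Int) (frontier : List Int) :
    List Int × List Int :=
  frontier.foldl (fun s x => pvInnerB dist s (PySem.List.pyGetD graph x [])) s

def pvLoopB (graph : List (List Int)) : Nat → List Int → List Int → Int → List Int
  | 0, v, _, _ => v
  | _ + 1, v, [], _ => v
  | f + 1, v, frontier, dist =>
      let s := pvPassB graph dist (v, []) frontier
      pvLoopB graph f s.1 s.2 (dist + 1)

-- one endpoint of road p lies in a cell of value d and the other endpoint addresses cell j
abbrev pvTouch (w : List Int) (L : Nat) (d : Int) (p : Int × Int) (j : Nat) : Prop :=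
  (w.getD (pvNorm L p.1) 0 = d ∧ pvNorm L p.2 = j) ∨
  (w.getD (pvNorm L p.2) 0 = d ∧ pvNorm L p.1 = j)

lemma pvIdx_eq (L : Nat) (i : Int) (h : PySem.Raise.InRange L i) :
    PySem.List.pyIdx? L i = some (pvNorm L i) := by
  obtain ⟨h1, h2⟩ := h
  simp only [PySem.List.pyIdx?, pvNorm]
  split_ifs <;> first | rfl | omega

lemma pvNorm_lt (L : Nat) (i : Int) (h : PySem.Raise.InRange L i) : pvNorm L i < L := by
  obtain ⟨h1, h2⟩ := h; simp only [pvNorm]; split_ifs <;> omega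

lemma pvGet {α : Type} (xs : List α) (i : Int) (d : α) (h : PySem.Raise.InRange xs.length i) :
    PySem.List.pyGetD xs i d = xs.getD (pvNorm xs.length i) d := by
  simp [PySem.List.pyGetD, PySem.List.pyGet?, pvIdx_eq _ _ h, List.getD_eq_getElem?_getD]

lemma pvSet {α : Type} (xs : List α) (i : Int) (w : α) (h : PySem.Raise.InRange xs.length i) :
    PySem.List.pySetD xs i w = xs.set (pvNorm xs.length i) w := by
  simp [PySem.List.pySetD, PySem.List.pySet?, pvIdx_eq _ _ h]

lemma pvGetD_set {α : Type} (xs : List α) (k j : Nat) (w d : α) (hk : k < xs.length) :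
    (xs.set k w).getD j d = if j = k then w else xs.getD j d := by
  simp only [List.getD_eq_getElem?_getD, List.getElem?_set]
  split_ifs with h1 h2 h3
  · simp
  · omega
  · omega
  · simp

lemma pvCN_set (xs : List Int) (k : Nat) (w : Int) (hk : k < xs.length)
    (h1 : xs.getD k 0 = -1) (h2 : w ≠ -1) : pvCN (xs.set k w) + 1 = pvCN xs := by
  induction xs generalizing k with
  | nil => simp at hk
  | cons a t ih =>
    cases k with
    | zero => simp_all [pvCN]
    | succ m =>
      have hm : m < t.length := by simpa using hk
      have h1' : t.getD m 0 = -1 := by simpa using h1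
      have := ih m hm h1'
      simp only [List.set_cons_succ, pvCN, List.countP_cons] at *
      omega

lemma pvCN_le (v : List Int) : pvCN v ≤ v.length := List.countP_le_length

lemma pvCN_pos (v : List Int) (j : Nat) (hj : j < v.length) (h : v.getD j 0 = -1) : 0 < pvCN v := by
  have hmem : (-1 : Int) ∈ v := by
    have := List.getD_eq_getElem v 0 hj
    rw [this] at h
    exact h ▸ List.getElem_mem hj
  exact List.countP_pos_iff.2 ⟨-1, hmem, by simp⟩

-- extensionality from pointwise getD on in-range cells
lemma pvExt (v w : List Int) (h1 : v.length = w.length)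
    (h2 : ∀ j, j < v.length → v.getD j 0 = w.getD j 0) : v = w := by
  apply List.ext_getElem h1
  intro i hi hi'
  have := h2 i hi
  rwa [List.getD_eq_getElem v 0 hi, List.getD_eq_getElem w 0 hi'] at this

lemma pvBuild_aux (L : Nat) (roads : List (Int × Int)) :
    ∀ g : List (List Int), g.length = L → (∀ l ∈ g, ∀ y ∈ l, PySem.Raise.InRange L y) →
    (∀ p ∈ roads, PySem.Raise.InRange L p.1 ∧ PySem.Raise.InRange L p.2) →
    (roads.foldl (fun g p =>
      let g1 := PySem.List.pySetD g p.1 (PySem.List.pyGetD g p.1 [] ++ [p.2])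
      PySem.List.pySetD g1 p.2 (PySem.List.pyGetD g1 p.2 [] ++ [p.1])) g).length = L ∧
    ∀ l ∈ (roads.foldl (fun g p =>
      let g1 := PySem.List.pySetD g p.1 (PySem.List.pyGetD g p.1 [] ++ [p.2])
      PySem.List.pySetD g1 p.2 (PySem.List.pyGetD g1 p.2 [] ++ [p.1])) g), ∀ y ∈ l,
      PySem.Raise.InRange L y := by
  induction roads with
  | nil => intro g hl hel _; exact ⟨hl, hel⟩
  | cons p t ih =>
    intro g hl hel hr
    have hp := hr p (List.mem_cons_self ..)
    have h1 : PySem.Raise.InRange g.length p.1 := hl ▸ hp.1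
    set g1 := PySem.List.pySetD g p.1 (PySem.List.pyGetD g p.1 [] ++ [p.2]) with hg1
    have hl1 : g1.length = L := by rw [hg1, pvSet _ _ _ h1]; simp [hl]
    have hel1 : ∀ l ∈ g1, ∀ y ∈ l, PySem.Raise.InRange L y := by
      rw [hg1, pvSet _ _ _ h1]
      intro l hlmem y hy
      rcases List.mem_or_eq_of_mem_set hlmem with h | h
      · exact hel l h y hy
      · subst h
        rcases List.mem_append.1 hy with h | h
        · exact hel _ (PySem.List.pyGetD_mem _ _ h1) y h
        · simp at h; subst h; exact hp.2
    have h2 : PySem.Raise.InRange g1.length p.2 := hl1 ▸ hp.2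
    set g2 := PySem.List.pySetD g1 p.2 (PySem.List.pyGetD g1 p.2 [] ++ [p.1]) with hg2
    have hl2 : g2.length = L := by rw [hg2, pvSet _ _ _ h2]; simp [hl1]
    have hel2 : ∀ l ∈ g2, ∀ y ∈ l, PySem.Raise.InRange L y := by
      rw [hg2, pvSet _ _ _ h2]
      intro l hlmem y hy
      rcases List.mem_or_eq_of_mem_set hlmem with h | h
      · exact hel1 l h y hy
      · subst h
        rcases List.mem_append.1 hy with h | h
        · exact hel1 _ (PySem.List.pyGetD_mem _ _ h2) y h
        · simp at h; subst h; exact hp.1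
    have := ih g2 hl2 hel2 (fun q hq => hr q (List.mem_cons_of_mem _ hq))
    simpa [List.foldl_cons] using this

lemma pvBuild_good (n : Int) (roads : List (Int × Int))
    (hr : ∀ p ∈ roads, PySem.Raise.InRange (n + 1).toNat p.1 ∧ PySem.Raise.InRange (n + 1).toNat p.2) :
    (pvBuildGraph n roads).length = (n + 1).toNat ∧
    ∀ l ∈ pvBuildGraph n roads, ∀ y ∈ l, PySem.Raise.InRange (n + 1).toNat y :=
  pvBuild_aux _ roads _ (by simp) (by simp) hr

lemma pvInnerB_cons (d : Int) (s : List Int × List Int) (nb : Int) (t : List Int) :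
    pvInnerB d s (nb :: t) =
      if PySem.List.pyGetD s.1 nb 0 = -1 then
        pvInnerB d (PySem.List.pySetD s.1 nb d, s.2 ++ [nb]) t
      else pvInnerB d s t := by
  simp only [pvInnerB, List.foldl_cons]
  by_cases h : PySem.List.pyGetD s.1 nb 0 = -1 <;> simp [h]

lemma pvInnerA_cons (x : Int) (s : List Int × List Int) (nb : Int) (t : List Int) :
    pvInnerA x s (nb :: t) =
      if PySem.List.pyGetD s.1 nb 0 = -1 then
        pvInnerA x (PySem.List.pySetD s.1 nb (PySem.List.pyGetD s.1 x 0 + 1), s.2 ++ [nb]) t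
      else pvInnerA x s t := by
  simp only [pvInnerA, List.foldl_cons]
  by_cases h : PySem.List.pyGetD s.1 nb 0 = -1 <;> simp [h]

lemma pvInnerB_acc (d : Int) (nbs : List Int) (v : List Int) (acc : List Int) :
    pvInnerB d (v, acc) nbs = ((pvInnerB d (v, []) nbs).1, acc ++ (pvInnerB d (v, []) nbs).2) := by
  induction nbs generalizing v acc with
  | nil => simp [pvInnerB]
  | cons nb t ih =>
    rw [pvInnerB_cons, pvInnerB_cons]
    by_cases h : PySem.List.pyGetD v nb 0 = -1
    · simp only [h, if_pos]
      rw [ih (PySem.List.pySetD v nb d) (acc ++ [nb]), ih (PySem.List.pySetD v nb d) ([] ++ [nb])]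
      simp
    · simp only [h, if_neg, not_false_iff]
      exact ih v acc

lemma pvInnerB_spec (L : Nat) (d : Int) (hd : d ≠ -1) (nbs : List Int) (v : List Int) (acc : List Int)
    (hv : v.length = L) (hn : ∀ nb ∈ nbs, PySem.Raise.InRange L nb) :
    (pvInnerB d (v, acc) nbs).1.length = L ∧
    (∃ new, (pvInnerB d (v, acc) nbs).2 = acc ++ new ∧
      (∀ y ∈ new, PySem.Raise.InRange L y ∧ (pvInnerB d (v, acc) nbs).1.getD (pvNorm L y) 0 = d) ∧
      pvCN (pvInnerB d (v, acc) nbs).1 + new.length = pvCN v) ∧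
    (∀ j, v.getD j 0 ≠ -1 → (pvInnerB d (v, acc) nbs).1.getD j 0 = v.getD j 0) := by
  induction nbs generalizing v acc with
  | nil => exact ⟨hv, ⟨[], by simp [pvInnerB], by simp, by simp [pvInnerB]⟩, fun j h => rfl⟩
  | cons nb t ih =>
    have hnb : PySem.Raise.InRange L nb := hn nb (List.mem_cons_self ..)
    have hnb' : PySem.Raise.InRange v.length nb := hv ▸ hnb
    have hlt : pvNorm L nb < v.length := hv ▸ pvNorm_lt L nb hnb
    rw [pvInnerB_cons]
    by_cases h : PySem.List.pyGetD v nb 0 = -1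
    · have hval : v.getD (pvNorm L nb) 0 = -1 := by rw [← hv, ← pvGet _ _ _ hnb']; exact h
      simp only [h, if_pos]
      rw [show PySem.List.pySetD v nb d = v.set (pvNorm L nb) d from by rw [pvSet _ _ _ hnb', hv]]
      set v' := v.set (pvNorm L nb) d with hv'
      have hlen' : v'.length = L := by simp [hv', hv]
      have hgetnb : v'.getD (pvNorm L nb) 0 = d := by
        rw [hv', pvGetD_set _ _ _ _ _ hlt]; simp
      obtain ⟨ih1, ⟨new, hnew, hprops, hcount⟩, ihpres⟩ :=
        ih v' (acc ++ [nb]) hlen' (fun z hz => hn z (List.mem_cons_of_mem _ hz))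
      refine ⟨ih1, ⟨nb :: new, by simpa using hnew, ?_, ?_⟩, ?_⟩
      · intro y hy
        rcases List.mem_cons.1 hy with h' | h'
        · subst h'
          exact ⟨hnb, by rw [ihpres _ (by rw [hgetnb]; exact hd)]; exact hgetnb⟩
        · exact hprops y h'
      · have hcv := pvCN_set v (pvNorm L nb) d hlt hval hd
        rw [← hv'] at hcv
        simp only [List.length_cons]
        omega
      · intro j hj
        have hne : j ≠ pvNorm L nb := fun he => hj (he ▸ hval)
        have heq : v'.getD j 0 = v.getD j 0 := by
          rw [hv', pvGetD_set _ _ _ _ _ hlt, if_neg hne]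
        rw [ihpres j (heq ▸ hj), heq]
    · simp only [h, if_neg, not_false_iff]
      exact ih v acc hv (fun z hz => hn z (List.mem_cons_of_mem _ hz))

lemma pvInnerA_eq (L : Nat) (d : Int) (hd : 1 ≤ d) (x : Int) (nbs : List Int) (v : List Int)
    (acc : List Int) (hv : v.length = L) (hx : PySem.Raise.InRange L x)
    (hxv : v.getD (pvNorm L x) 0 = d - 1) (hn : ∀ nb ∈ nbs, PySem.Raise.InRange L nb) :
    pvInnerA x (v, acc) nbs = pvInnerB d (v, acc) nbs := by
  induction nbs generalizing v acc with
  | nil => rfl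
  | cons nb t ih =>
    have hnb : PySem.Raise.InRange L nb := hn nb (List.mem_cons_self ..)
    have hnb' : PySem.Raise.InRange v.length nb := hv ▸ hnb
    have hx' : PySem.Raise.InRange v.length x := hv ▸ hx
    have hlt : pvNorm L nb < v.length := hv ▸ pvNorm_lt L nb hnb
    rw [pvInnerA_cons, pvInnerB_cons]
    by_cases h : PySem.List.pyGetD v nb 0 = -1
    · have hval : v.getD (pvNorm L nb) 0 = -1 := by rw [← hv, ← pvGet _ _ _ hnb']; exact h
      have hxval : PySem.List.pyGetD v x 0 = d - 1 := by rw [pvGet _ _ _ hx', hv]; exact hxv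
      have hassign : PySem.List.pyGetD v x 0 + 1 = d := by rw [hxval]; ring
      simp only [h, if_pos, hassign]
      have hne : pvNorm L x ≠ pvNorm L nb := by
        intro he; rw [he, hval] at hxv; omega
      have hset : PySem.List.pySetD v nb d = v.set (pvNorm L nb) d := by rw [pvSet _ _ _ hnb', hv]
      have hxv' : (v.set (pvNorm L nb) d).getD (pvNorm L x) 0 = d - 1 := by
        rw [pvGetD_set _ _ _ _ _ hlt, if_neg hne]; exact hxv
      rw [hset]
      exact ih (v.set (pvNorm L nb) d) (acc ++ [nb]) (by simp [hv]) hxv'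
        (fun z hz => hn z (List.mem_cons_of_mem _ hz))
    · simp only [h, if_neg, not_false_iff]
      exact ih v acc hv hxv (fun z hz => hn z (List.mem_cons_of_mem _ hz))

lemma pvLoopA_nil (graph : List (List Int)) (f : Nat) (v : List Int) :
    pvLoopA graph f v [] = v := by cases f <;> rfl

lemma pvLoopB_nil (graph : List (List Int)) (f : Nat) (v : List Int) (d : Int) :
    pvLoopB graph f v [] d = v := by cases f <;> rfl

lemma pvPassB_cons (graph : List (List Int)) (d : Int) (s : List Int × List Int) (x : Int)
    (fr : List Int) :
    pvPassB graph d s (x :: fr) = pvPassB graph d (pvInnerB d s (PySem.List.pyGetD graph x [])) fr := rfl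

lemma pvPassB_acc (graph : List (List Int)) (d : Int) (front : List Int) (v : List Int) (acc : List Int) :
    pvPassB graph d (v, acc) front =
      ((pvPassB graph d (v, []) front).1, acc ++ (pvPassB graph d (v, []) front).2) := by
  induction front generalizing v acc with
  | nil => simp [pvPassB]
  | cons x fr ih =>
    rw [pvPassB_cons, pvPassB_cons, pvInnerB_acc d _ v acc, ih]
    conv_rhs => rw [show pvInnerB d (v, []) (PySem.List.pyGetD graph x []) =
      ((pvInnerB d (v, []) (PySem.List.pyGetD graph x [])).1,
       (pvInnerB d (v, []) (PySem.List.pyGetD graph x [])).2) from rfl]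
    conv_rhs => rw [ih]
    simp

lemma pvPassB_spec (graph : List (List Int)) (L : Nat)
    (hg : ∀ x, PySem.Raise.InRange L x → ∀ y ∈ PySem.List.pyGetD graph x [], PySem.Raise.InRange L y)
    (d : Int) (hd : d ≠ -1) (front : List Int) (v : List Int) (acc : List Int)
    (hv : v.length = L) (hf : ∀ x ∈ front, PySem.Raise.InRange L x) :
    (pvPassB graph d (v, acc) front).1.length = L ∧
    (∃ new, (pvPassB graph d (v, acc) front).2 = acc ++ new ∧
      (∀ y ∈ new, PySem.Raise.InRange L y ∧ (pvPassB graph d (v, acc) front).1.getD (pvNorm L y) 0 = d) ∧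
      pvCN (pvPassB graph d (v, acc) front).1 + new.length = pvCN v) ∧
    (∀ j, v.getD j 0 ≠ -1 → (pvPassB graph d (v, acc) front).1.getD j 0 = v.getD j 0) := by
  induction front generalizing v acc with
  | nil => exact ⟨hv, ⟨[], by simp [pvPassB], by simp, by simp [pvPassB]⟩, fun j h => rfl⟩
  | cons x fr ih =>
    have hx : PySem.Raise.InRange L x := hf x (List.mem_cons_self ..)
    obtain ⟨hl1, ⟨n1, hn1, hp1, hc1⟩, hpres1⟩ :=
      pvInnerB_spec L d hd (PySem.List.pyGetD graph x []) v acc hv (hg x hx)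
    rw [pvPassB_cons]
    rw [show pvInnerB d (v, acc) (PySem.List.pyGetD graph x []) =
      ((pvInnerB d (v, acc) (PySem.List.pyGetD graph x [])).1,
       (pvInnerB d (v, acc) (PySem.List.pyGetD graph x [])).2) from rfl]
    obtain ⟨ihl, ⟨n2, hn2, hp2, hc2⟩, ihpres⟩ :=
      ih (pvInnerB d (v, acc) (PySem.List.pyGetD graph x [])).1
        (pvInnerB d (v, acc) (PySem.List.pyGetD graph x [])).2 hl1
        (fun z hz => hf z (List.mem_cons_of_mem _ hz))
    refine ⟨ihl, ⟨n1 ++ n2, by rw [hn2, hn1]; simp, ?_, ?_⟩, ?_⟩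
    · intro y hy
      rcases List.mem_append.1 hy with h' | h'
      · obtain ⟨hir, hval⟩ := hp1 y h'
        exact ⟨hir, by rw [ihpres _ (by rw [hval]; exact hd)]; exact hval⟩
      · exact hp2 y h'
    · rw [List.length_append]; omega
    · intro j hj
      rw [ihpres j (by rw [hpres1 j hj]; exact hj), hpres1 j hj]

lemma pvLoopA_unroll (graph : List (List Int)) (L : Nat)
    (hg : ∀ x, PySem.Raise.InRange L x → ∀ y ∈ PySem.List.pyGetD graph x [], PySem.Raise.InRange L y)
    (d : Int) (hd : 1 ≤ d) :
    ∀ (front pending v : List Int) (f : Nat), v.length = L →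
    (∀ x ∈ front, PySem.Raise.InRange L x ∧ v.getD (pvNorm L x) 0 = d - 1) →
    front.length ≤ f →
    pvLoopA graph f v (front ++ pending) =
      pvLoopA graph (f - front.length) (pvPassB graph d (v, []) front).1
        (pending ++ (pvPassB graph d (v, []) front).2) := by
  intro front
  induction front with
  | nil => intro pending v f hv _ _; simp [pvPassB]
  | cons x fs ih =>
    intro pending v f hv hfr hfuel
    have hx := (hfr x (List.mem_cons_self ..)).1
    have hxv := (hfr x (List.mem_cons_self ..)).2
    obtain ⟨f', rfl⟩ : ∃ f', f = f' + 1 := ⟨f - 1, by simp at hfuel; omega⟩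
    have hstep : pvStepA graph v x = pvInnerB d (v, []) (PySem.List.pyGetD graph x []) := by
      rw [pvStepA, pvInnerA_eq L d hd x _ v [] hv hx hxv (hg x hx)]
    have hA : pvLoopA graph (f' + 1) v ((x :: fs) ++ pending) =
        pvLoopA graph f' (pvInnerB d (v, []) (PySem.List.pyGetD graph x [])).1
          (fs ++ (pending ++ (pvInnerB d (v, []) (PySem.List.pyGetD graph x [])).2)) := by
      show pvLoopA graph f' (pvStepA graph v x).1 ((fs ++ pending) ++ (pvStepA graph v x).2) = _
      rw [hstep, List.append_assoc]
    rw [hA]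
    obtain ⟨hl1, ⟨n1, hn1, hp1, hc1⟩, hpres1⟩ :=
      pvInnerB_spec L d (by omega) (PySem.List.pyGetD graph x []) v [] hv (hg x hx)
    have hfr' : ∀ z ∈ fs, PySem.Raise.InRange L z ∧
        (pvInnerB d (v, []) (PySem.List.pyGetD graph x [])).1.getD (pvNorm L z) 0 = d - 1 := by
      intro z hz
      obtain ⟨hzr, hzv⟩ := hfr z (List.mem_cons_of_mem _ hz)
      exact ⟨hzr, by rw [hpres1 _ (by rw [hzv]; intro hc; omega)]; exact hzv⟩
    rw [ih (pending ++ (pvInnerB d (v, []) (PySem.List.pyGetD graph x [])).2)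
      (pvInnerB d (v, []) (PySem.List.pyGetD graph x [])).1 f' hl1 hfr' (by simp at hfuel ⊢; omega)]
    conv_rhs => rw [pvPassB_cons]
    conv_rhs => rw [show pvInnerB d (v, []) (PySem.List.pyGetD graph x []) =
      ((pvInnerB d (v, []) (PySem.List.pyGetD graph x [])).1,
       (pvInnerB d (v, []) (PySem.List.pyGetD graph x [])).2) from rfl]
    conv_rhs => rw [pvPassB_acc]
    simp [Nat.succ_sub_succ]

lemma pvLoops_eq (graph : List (List Int)) (L : Nat)
    (hg : ∀ x, PySem.Raise.InRange L x → ∀ y ∈ PySem.List.pyGetD graph x [], PySem.Raise.InRange L y) :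
    ∀ (fB fA : Nat) (v front : List Int) (d : Int), 1 ≤ d → v.length = L →
    (∀ x ∈ front, PySem.Raise.InRange L x ∧ v.getD (pvNorm L x) 0 = d - 1) →
    pvCN v + front.length + 1 ≤ fA → pvCN v + 1 ≤ fB →
    pvLoopA graph fA v front = pvLoopB graph fB v front d := by
  intro fB
  induction fB with
  | zero => intro fA v front d _ _ _ _ h; omega
  | succ g ih =>
    intro fA v front d hd hv hfr hfA hfB
    cases front with
    | nil => rw [pvLoopA_nil, pvLoopB_nil]
    | cons x fs =>
      have hf : ∀ z ∈ x :: fs, PySem.Raise.InRange L z := fun z hz => (hfr z hz).1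
      obtain ⟨hl, ⟨new, hnew, hprops, hcount⟩, hpres⟩ :=
        pvPassB_spec graph L hg d (by omega) (x :: fs) v [] hv hf
      have hnew' : (pvPassB graph d (v, []) (x :: fs)).2 = new := by simpa using hnew
      have hB : pvLoopB graph (g + 1) v (x :: fs) d =
          pvLoopB graph g (pvPassB graph d (v, []) (x :: fs)).1
            (pvPassB graph d (v, []) (x :: fs)).2 (d + 1) := rfl
      have hA : pvLoopA graph fA v (x :: fs) =
          pvLoopA graph (fA - (x :: fs).length) (pvPassB graph d (v, []) (x :: fs)).1
            (pvPassB graph d (v, []) (x :: fs)).2 := by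
        conv_lhs => rw [show (x :: fs) = (x :: fs) ++ [] from by simp]
        rw [pvLoopA_unroll graph L hg d hd (x :: fs) [] v fA hv hfr (by simp at hfA ⊢; omega)]
        simp
      rw [hA, hB]
      by_cases hempty : new = []
      · rw [hnew', hempty, pvLoopA_nil, pvLoopB_nil]
      · have hlen1 : 0 < new.length := List.length_pos_iff.2 hempty
        apply ih
        · omega
        · exact hl
        · rw [hnew']
          intro y hy
          obtain ⟨h1, h2⟩ := hprops y hy
          exact ⟨h1, by rw [h2]; ring⟩
        · rw [hnew']; simp at hfA ⊢; omega
        · omega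

-- ---- level pass characterized pointwise (relative to its start array) ----

lemma pvInnerB_char (L : Nat) (d' : Int) (hd' : d' ≠ -1) :
    ∀ nbs : List Int, (∀ y ∈ nbs, PySem.Raise.InRange L y) →
    ∀ w : List Int, w.length = L →
    (pvInnerB d' (w, []) nbs).1.length = L ∧
    (∀ j, (pvInnerB d' (w, []) nbs).1.getD j 0 =
      if w.getD j 0 = -1 ∧ ∃ y ∈ nbs, pvNorm L y = j then d' else w.getD j 0) ∧
    (∀ j, (∃ y ∈ (pvInnerB d' (w, []) nbs).2, pvNorm L y = j) ↔
      (w.getD j 0 = -1 ∧ ∃ y ∈ nbs, pvNorm L y = j)) := by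
  intro nbs
  induction nbs with
  | nil =>
    intro _ w hw
    refine ⟨hw, fun j => by simp [pvInnerB], fun j => by simp [pvInnerB]⟩
  | cons nb t ih =>
    intro hn w hw
    have hnb : PySem.Raise.InRange L nb := hn nb (List.mem_cons_self ..)
    have hnb' : PySem.Raise.InRange w.length nb := hw ▸ hnb
    have hlt : pvNorm L nb < w.length := hw ▸ pvNorm_lt L nb hnb
    have hpg : PySem.List.pyGetD w nb 0 = w.getD (pvNorm L nb) 0 := by
      rw [pvGet _ _ _ hnb', hw]
    rw [pvInnerB_cons]
    by_cases h : PySem.List.pyGetD w nb 0 = -1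
    · have hval : w.getD (pvNorm L nb) 0 = -1 := hpg ▸ h
      simp only [h, if_pos]
      rw [show PySem.List.pySetD w nb d' = w.set (pvNorm L nb) d' from by
        rw [pvSet _ _ _ hnb', hw]]
      rw [pvInnerB_acc]
      obtain ⟨ih1, ih2, ih3⟩ := ih (fun z hz => hn z (List.mem_cons_of_mem _ hz))
        (w.set (pvNorm L nb) d') (by simp [hw])
      have hw' : ∀ j, (w.set (pvNorm L nb) d').getD j 0 =
          if j = pvNorm L nb then d' else w.getD j 0 := fun j => pvGetD_set _ _ _ _ _ hlt
      refine ⟨ih1, ?_, ?_⟩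
      · intro j
        rw [ih2 j, hw' j]
        by_cases hj : j = pvNorm L nb
        · subst hj
          rw [if_pos rfl, ite_self, if_pos ⟨hval, nb, List.mem_cons_self .., rfl⟩]
        · simp only [if_neg hj]
          by_cases hc : w.getD j 0 = -1 ∧ ∃ y ∈ t, pvNorm L y = j
          · obtain ⟨h1, y, hy, hyj⟩ := hc
            rw [if_pos ⟨h1, y, hy, hyj⟩, if_pos ⟨h1, y, List.mem_cons_of_mem _ hy, hyj⟩]
          · have hcc : ¬(w.getD j 0 = -1 ∧ ∃ y ∈ nb :: t, pvNorm L y = j) := by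
              rintro ⟨h1, y, hy, hyj⟩
              rcases List.mem_cons.1 hy with rfl | hy'
              · exact hj hyj.symm
              · exact hc ⟨h1, y, hy', hyj⟩
            rw [if_neg hc, if_neg hcc]
      · intro j
        constructor
        · rintro ⟨y, hy, hyj⟩
          have hy2 : y = nb ∨ y ∈ (pvInnerB d' (w.set (pvNorm L nb) d', []) t).2 := by
            simpa using hy
          rcases hy2 with hy2 | hy2
          · rw [hy2] at hyj
            rw [← hyj]
            exact ⟨hval, nb, List.mem_cons_self .., rfl⟩
          · have := (ih3 j).1 ⟨y, hy2, hyj⟩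
            rw [hw' j] at this
            obtain ⟨hj1, y', hy', hyj'⟩ := this
            by_cases hj : j = pvNorm L nb
            · rw [hj]
              exact ⟨hval, nb, List.mem_cons_self .., rfl⟩
            · rw [if_neg hj] at hj1
              exact ⟨hj1, y', List.mem_cons_of_mem _ hy', hyj'⟩
        · rintro ⟨hj1, y, hy, hyj⟩
          by_cases hj : j = pvNorm L nb
          · exact ⟨nb, by simp, hj.symm⟩
          · rcases List.mem_cons.1 hy with rfl | hy'
            · exact absurd hyj.symm hj
            · have hex : ∃ z ∈ (pvInnerB d' (w.set (pvNorm L nb) d', []) t).2, pvNorm L z = j := by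
                apply (ih3 j).2
                rw [hw' j, if_neg hj]
                exact ⟨hj1, y, hy', hyj⟩
              obtain ⟨z, hz, hzj⟩ := hex
              exact ⟨z, by simp [hz], hzj⟩
    · have hval : ¬ w.getD (pvNorm L nb) 0 = -1 := hpg ▸ h
      simp only [h, if_neg, not_false_iff]
      obtain ⟨ih1, ih2, ih3⟩ := ih (fun z hz => hn z (List.mem_cons_of_mem _ hz)) w hw
      have hcond : ∀ j, (w.getD j 0 = -1 ∧ ∃ y ∈ nb :: t, pvNorm L y = j) ↔
          (w.getD j 0 = -1 ∧ ∃ y ∈ t, pvNorm L y = j) := by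
        intro j
        constructor
        · rintro ⟨h1, y, hy, hyj⟩
          rcases List.mem_cons.1 hy with rfl | hy'
          · exact absurd (hyj ▸ h1) hval
          · exact ⟨h1, y, hy', hyj⟩
        · rintro ⟨h1, y, hy, hyj⟩; exact ⟨h1, y, List.mem_cons_of_mem _ hy, hyj⟩
      refine ⟨ih1, ?_, ?_⟩
      · intro j
        rw [ih2 j]
        by_cases hc : w.getD j 0 = -1 ∧ ∃ y ∈ t, pvNorm L y = j
        · rw [if_pos hc, if_pos ((hcond j).mpr hc)]
        · rw [if_neg hc, if_neg (fun hx => hc ((hcond j).mp hx))]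
      · intro j
        rw [ih3 j]
        exact (hcond j).symm

lemma pvPassB_char (graph : List (List Int)) (L : Nat)
    (hg : ∀ x, PySem.Raise.InRange L x → ∀ y ∈ PySem.List.pyGetD graph x [], PySem.Raise.InRange L y)
    (d' : Int) (hd' : d' ≠ -1) :
    ∀ front : List Int, (∀ x ∈ front, PySem.Raise.InRange L x) →
    ∀ w : List Int, w.length = L →
    (pvPassB graph d' (w, []) front).1.length = L ∧
    (∀ j, (pvPassB graph d' (w, []) front).1.getD j 0 =
      if w.getD j 0 = -1 ∧ ∃ x ∈ front, ∃ y ∈ PySem.List.pyGetD graph x [], pvNorm L y = j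
      then d' else w.getD j 0) ∧
    (∀ j, (∃ y ∈ (pvPassB graph d' (w, []) front).2, pvNorm L y = j) ↔
      (w.getD j 0 = -1 ∧ ∃ x ∈ front, ∃ y ∈ PySem.List.pyGetD graph x [], pvNorm L y = j)) := by
  intro front
  induction front with
  | nil =>
    intro _ w hw
    exact ⟨hw, fun j => by simp [pvPassB], fun j => by simp [pvPassB]⟩
  | cons x fs ih =>
    intro hf w hw
    have hx : PySem.Raise.InRange L x := hf x (List.mem_cons_self ..)
    obtain ⟨i1, i2, i3⟩ := pvInnerB_char L d' hd' (PySem.List.pyGetD graph x []) (hg x hx) w hw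
    rw [pvPassB_cons]
    rw [show pvInnerB d' (w, []) (PySem.List.pyGetD graph x []) =
      ((pvInnerB d' (w, []) (PySem.List.pyGetD graph x [])).1,
       (pvInnerB d' (w, []) (PySem.List.pyGetD graph x [])).2) from rfl]
    rw [pvPassB_acc]
    obtain ⟨p1, p2, p3⟩ := ih (fun z hz => hf z (List.mem_cons_of_mem _ hz))
      (pvInnerB d' (w, []) (PySem.List.pyGetD graph x [])).1 i1
    have hcons : ∀ j, (∃ z ∈ x :: fs, ∃ y ∈ PySem.List.pyGetD graph z [], pvNorm L y = j) ↔
        ((∃ y ∈ PySem.List.pyGetD graph x [], pvNorm L y = j) ∨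
         (∃ z ∈ fs, ∃ y ∈ PySem.List.pyGetD graph z [], pvNorm L y = j)) := by
      intro j
      constructor
      · rintro ⟨z, hz, hy⟩
        rcases List.mem_cons.1 hz with rfl | hz'
        · exact Or.inl hy
        · exact Or.inr ⟨z, hz', hy⟩
      · rintro (hy | ⟨z, hz, hy⟩)
        · exact ⟨x, List.mem_cons_self .., hy⟩
        · exact ⟨z, List.mem_cons_of_mem _ hz, hy⟩
    refine ⟨p1, ?_, ?_⟩
    · intro j
      rw [p2 j, i2 j]
      by_cases hA : w.getD j 0 = -1
      · by_cases hB : ∃ y ∈ PySem.List.pyGetD graph x [], pvNorm L y = j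
        · have hin : (if w.getD j 0 = -1 ∧ ∃ y ∈ PySem.List.pyGetD graph x [], pvNorm L y = j
              then d' else w.getD j 0) = d' := if_pos ⟨hA, hB⟩
          rw [hin, if_neg (fun hx2 => hd' hx2.1), if_pos ⟨hA, (hcons j).mpr (Or.inl hB)⟩]
        · have hin : (if w.getD j 0 = -1 ∧ ∃ y ∈ PySem.List.pyGetD graph x [], pvNorm L y = j
              then d' else w.getD j 0) = w.getD j 0 := if_neg (fun hx2 => hB hx2.2)
          rw [hin]
          by_cases hC : ∃ z ∈ fs, ∃ y ∈ PySem.List.pyGetD graph z [], pvNorm L y = j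
          · rw [if_pos ⟨hA, hC⟩, if_pos ⟨hA, (hcons j).mpr (Or.inr hC)⟩]
          · rw [if_neg (fun hx2 => hC hx2.2),
                if_neg (fun hx2 => ((hcons j).mp hx2.2).elim hB hC)]
      · have hin : (if w.getD j 0 = -1 ∧ ∃ y ∈ PySem.List.pyGetD graph x [], pvNorm L y = j
            then d' else w.getD j 0) = w.getD j 0 := if_neg (fun hx2 => hA hx2.1)
        rw [hin, if_neg (fun hx2 => hA hx2.1), if_neg (fun hx2 => hA hx2.1)]
    · intro j
      have e3 := p3 j
      rw [i2 j] at e3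
      have hsplit : (∃ y ∈ (pvInnerB d' (w, []) (PySem.List.pyGetD graph x [])).2 ++
          (pvPassB graph d' ((pvInnerB d' (w, []) (PySem.List.pyGetD graph x [])).1, []) fs).2,
          pvNorm L y = j) ↔
        ((∃ y ∈ (pvInnerB d' (w, []) (PySem.List.pyGetD graph x [])).2, pvNorm L y = j) ∨
         (∃ y ∈ (pvPassB graph d' ((pvInnerB d' (w, []) (PySem.List.pyGetD graph x [])).1, []) fs).2,
          pvNorm L y = j)) := by
        constructor
        · rintro ⟨y, hy, hyj⟩
          rcases List.mem_append.1 hy with h' | h'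
          · exact Or.inl ⟨y, h', hyj⟩
          · exact Or.inr ⟨y, h', hyj⟩
        · rintro (⟨y, hy, hyj⟩ | ⟨y, hy, hyj⟩)
          · exact ⟨y, List.mem_append_left _ hy, hyj⟩
          · exact ⟨y, List.mem_append_right _ hy, hyj⟩
      rw [hsplit, i3 j, e3]
      constructor
      · rintro (⟨h1, h2⟩ | ⟨h1, h2⟩)
        · exact ⟨h1, (hcons j).mpr (Or.inl h2)⟩
        · have hA : w.getD j 0 = -1 := by
            by_cases hAB : w.getD j 0 = -1 ∧ ∃ y ∈ PySem.List.pyGetD graph x [], pvNorm L y = j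
            · rw [if_pos hAB] at h1; exact absurd h1 hd'
            · rwa [if_neg hAB] at h1
          exact ⟨hA, (hcons j).mpr (Or.inr h2)⟩
      · rintro ⟨h1, h2⟩
        rcases (hcons j).mp h2 with hB | hC
        · exact Or.inl ⟨h1, hB⟩
        · by_cases hB : ∃ y ∈ PySem.List.pyGetD graph x [], pvNorm L y = j
          · exact Or.inl ⟨h1, hB⟩
          · refine Or.inr ⟨?_, hC⟩
            rw [if_neg (fun hx2 => hB hx2.2)]
            exact h1

-- ---- relaxation pass characterized pointwise ----

lemma pvRelaxStep_char (L : Nat) (d : Int) (hd : 0 ≤ d) (p : Int × Int)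
    (hp : PySem.Raise.InRange L p.1 ∧ PySem.Raise.InRange L p.2)
    (w : List Int) (flag : Bool) (hw : w.length = L) :
    (pvRelaxStep d (w, flag) p).1.length = L ∧
    (∀ j, (pvRelaxStep d (w, flag) p).1.getD j 0 =
      if w.getD j 0 = -1 ∧ pvTouch w L d p j then d + 1 else w.getD j 0) ∧
    ((pvRelaxStep d (w, flag) p).2 = true ↔
      flag = true ∨ ∃ j, w.getD j 0 = -1 ∧ pvTouch w L d p j) := by
  obtain ⟨hp1, hp2⟩ := hp
  have hp1' : PySem.Raise.InRange w.length p.1 := hw ▸ hp1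
  have hp2' : PySem.Raise.InRange w.length p.2 := hw ▸ hp2
  have hna : pvNorm L p.1 < w.length := hw ▸ pvNorm_lt L p.1 hp1
  have hnb : pvNorm L p.2 < w.length := hw ▸ pvNorm_lt L p.2 hp2
  have hga : PySem.List.pyGetD w p.1 0 = w.getD (pvNorm L p.1) 0 := by rw [pvGet _ _ _ hp1', hw]
  have hgb : PySem.List.pyGetD w p.2 0 = w.getD (pvNorm L p.2) 0 := by rw [pvGet _ _ _ hp2', hw]
  have hseta : PySem.List.pySetD w p.1 (d + 1) = w.set (pvNorm L p.1) (d + 1) := by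
    rw [pvSet _ _ _ hp1', hw]
  have hsetb : PySem.List.pySetD w p.2 (d + 1) = w.set (pvNorm L p.2) (d + 1) := by
    rw [pvSet _ _ _ hp2', hw]
  by_cases c1 : PySem.List.pyGetD w p.1 0 = d ∧ PySem.List.pyGetD w p.2 0 = -1
  · have hA1 : w.getD (pvNorm L p.1) 0 = d := hga ▸ c1.1
    have hB1 : w.getD (pvNorm L p.2) 0 = -1 := hgb ▸ c1.2
    have hres : pvRelaxStep d (w, flag) p = (w.set (pvNorm L p.2) (d + 1), true) := by
      simp only [pvRelaxStep]
      rw [if_pos c1, hsetb]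
      have hcond : ¬(PySem.List.pyGetD (w.set (pvNorm L p.2) (d + 1)) p.2 0 = d ∧
          PySem.List.pyGetD (w.set (pvNorm L p.2) (d + 1)) p.1 0 = -1) := by
        rintro ⟨h1, -⟩
        rw [pvGet _ _ _ (by simpa using hp2')] at h1
        simp only [List.length_set] at h1
        rw [hw] at h1
        rw [pvGetD_set _ _ _ _ _ hnb, if_pos rfl] at h1
        omega
      rw [if_neg hcond]
    rw [hres]
    have hA2false : ¬ w.getD (pvNorm L p.2) 0 = d := by rw [hB1]; omega
    refine ⟨by simp [hw], ?_, ?_⟩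
    · intro j
      rw [pvGetD_set _ _ _ _ _ hnb]
      by_cases hj : j = pvNorm L p.2
      · rw [if_pos hj, if_pos ⟨hj ▸ hB1, Or.inl ⟨hA1, hj.symm⟩⟩]
      · rw [if_neg hj, if_neg ?_]
        rintro ⟨h1, (⟨-, h2⟩ | ⟨h2, -⟩)⟩
        · exact hj h2.symm
        · exact hA2false h2
    · simp only [true_iff]
      exact Or.inr ⟨pvNorm L p.2, hB1, Or.inl ⟨hA1, rfl⟩⟩
  · by_cases c2 : PySem.List.pyGetD w p.2 0 = d ∧ PySem.List.pyGetD w p.1 0 = -1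
    · have hA2 : w.getD (pvNorm L p.2) 0 = d := hgb ▸ c2.1
      have hB2 : w.getD (pvNorm L p.1) 0 = -1 := hga ▸ c2.2
      have hA1false : ¬ w.getD (pvNorm L p.1) 0 = d := by rw [hB2]; omega
      have hres : pvRelaxStep d (w, flag) p = (w.set (pvNorm L p.1) (d + 1), true) := by
        simp only [pvRelaxStep]
        rw [if_neg c1, if_pos c2, hseta]
      rw [hres]
      refine ⟨by simp [hw], ?_, ?_⟩
      · intro j
        rw [pvGetD_set _ _ _ _ _ hna]
        by_cases hj : j = pvNorm L p.1
        · rw [if_pos hj, if_pos ⟨hj ▸ hB2, Or.inr ⟨hA2, hj.symm⟩⟩]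
        · rw [if_neg hj, if_neg ?_]
          rintro ⟨h1, (⟨h2, -⟩ | ⟨-, h2⟩)⟩
          · exact hA1false h2
          · exact hj h2.symm
      · simp only [true_iff]
        exact Or.inr ⟨pvNorm L p.1, hB2, Or.inr ⟨hA2, rfl⟩⟩
    · have hres : pvRelaxStep d (w, flag) p = (w, flag) := by
        simp only [pvRelaxStep]
        rw [if_neg c1, if_neg c2]
      rw [hres]
      have hnone : ∀ j, ¬(w.getD j 0 = -1 ∧ pvTouch w L d p j) := by
        rintro j ⟨h1, (⟨h2, h3⟩ | ⟨h2, h3⟩)⟩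
        · exact c1 ⟨hga ▸ h2, hgb ▸ (h3 ▸ h1)⟩
        · exact c2 ⟨hgb ▸ h2, hga ▸ (h3 ▸ h1)⟩
      refine ⟨hw, ?_, ?_⟩
      · intro j
        rw [if_neg (hnone j)]
      · constructor
        · exact Or.inl
        · rintro (h | ⟨j, hj⟩)
          · exact h
          · exact absurd hj (hnone j)

lemma pvRelaxFold_char (L : Nat) (d : Int) (hd : 0 ≤ d) :
    ∀ roads : List (Int × Int),
    (∀ p ∈ roads, PySem.Raise.InRange L p.1 ∧ PySem.Raise.InRange L p.2) →
    ∀ (w : List Int) (flag : Bool), w.length = L →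
    (roads.foldl (pvRelaxStep d) (w, flag)).1.length = L ∧
    (∀ j, (roads.foldl (pvRelaxStep d) (w, flag)).1.getD j 0 =
      if w.getD j 0 = -1 ∧ ∃ p ∈ roads, pvTouch w L d p j then d + 1 else w.getD j 0) ∧
    ((roads.foldl (pvRelaxStep d) (w, flag)).2 = true ↔
      flag = true ∨ ∃ j, w.getD j 0 = -1 ∧ ∃ p ∈ roads, pvTouch w L d p j) := by
  intro roads
  induction roads with
  | nil =>
    intro _ w flag hw
    refine ⟨hw, fun j => by simp, by simp⟩
  | cons p t ih =>
    intro hr w flag hw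
    rw [List.foldl_cons]
    obtain ⟨s1l, s1p, s1f⟩ :=
      pvRelaxStep_char L d hd p (hr p (List.mem_cons_self ..)) w flag hw
    rw [show pvRelaxStep d (w, flag) p =
      ((pvRelaxStep d (w, flag) p).1, (pvRelaxStep d (w, flag) p).2) from rfl]
    obtain ⟨il, ip, iflag⟩ := ih (fun q hq => hr q (List.mem_cons_of_mem _ hq))
      (pvRelaxStep d (w, flag) p).1 (pvRelaxStep d (w, flag) p).2 s1l
    have t1 : ∀ k, ((pvRelaxStep d (w, flag) p).1.getD k 0 = d ↔ w.getD k 0 = d) := by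
      intro k
      rw [s1p k]
      by_cases hc : w.getD k 0 = -1 ∧ pvTouch w L d p k
      · rw [if_pos hc]
        constructor
        · intro h; omega
        · intro h; rw [hc.1] at h; omega
      · rw [if_neg hc]
    have t2 : ∀ k, ((pvRelaxStep d (w, flag) p).1.getD k 0 = -1 ↔
        (w.getD k 0 = -1 ∧ ¬ pvTouch w L d p k)) := by
      intro k
      rw [s1p k]
      by_cases hc : w.getD k 0 = -1 ∧ pvTouch w L d p k
      · rw [if_pos hc]
        constructor
        · intro h; omega
        · rintro ⟨-, hnt⟩; exact absurd hc.2 hnt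
      · rw [if_neg hc]
        constructor
        · intro h
          exact ⟨h, fun ht => hc ⟨h, ht⟩⟩
        · rintro ⟨h, -⟩; exact h
    have t3 : ∀ q k, (pvTouch (pvRelaxStep d (w, flag) p).1 L d q k ↔ pvTouch w L d q k) := by
      intro q k
      simp only [pvTouch, t1]
    have hconsP : ∀ j, (∃ q ∈ p :: t, pvTouch w L d q j) ↔
        (pvTouch w L d p j ∨ ∃ q ∈ t, pvTouch w L d q j) := by
      intro j
      constructor
      · rintro ⟨q, hq, hqt⟩
        rcases List.mem_cons.1 hq with rfl | hq'
        · exact Or.inl hqt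
        · exact Or.inr ⟨q, hq', hqt⟩
      · rintro (h | ⟨q, hq, hqt⟩)
        · exact ⟨p, List.mem_cons_self .., h⟩
        · exact ⟨q, List.mem_cons_of_mem _ hq, hqt⟩
    refine ⟨il, ?_, ?_⟩
    · intro j
      rw [ip j]
      by_cases hA : w.getD j 0 = -1
      · by_cases hB : pvTouch w L d p j
        · have hw1 : (pvRelaxStep d (w, flag) p).1.getD j 0 = d + 1 := by
            rw [s1p j, if_pos ⟨hA, hB⟩]
          rw [if_neg (fun hx2 => by have h := hx2.1; rw [hw1] at h; omega),
              if_pos ⟨hA, (hconsP j).mpr (Or.inl hB)⟩, hw1]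
        · have hw1 : (pvRelaxStep d (w, flag) p).1.getD j 0 = w.getD j 0 := by
            rw [s1p j, if_neg (fun hx2 => hB hx2.2)]
          rw [hw1]
          by_cases hC : ∃ q ∈ t, pvTouch w L d q j
          · have hC' : ∃ q ∈ t, pvTouch (pvRelaxStep d (w, flag) p).1 L d q j := by
              obtain ⟨q, hq, hqt⟩ := hC
              exact ⟨q, hq, (t3 q j).mpr hqt⟩
            rw [if_pos ⟨hA, hC'⟩, if_pos ⟨hA, (hconsP j).mpr (Or.inr hC)⟩]
          · rw [if_neg ?_, if_neg ?_]
            · rintro ⟨h1, h2⟩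
              rcases (hconsP j).mp h2 with h | h
              · exact hB h
              · exact hC h
            · rintro ⟨-, q, hq, hqt⟩
              exact hC ⟨q, hq, (t3 q j).mp hqt⟩
      · have hw1 : (pvRelaxStep d (w, flag) p).1.getD j 0 = w.getD j 0 := by
          rw [s1p j, if_neg (fun hx2 => hA hx2.1)]
        rw [hw1, if_neg (fun hx2 => hA hx2.1), if_neg (fun hx2 => hA hx2.1)]
    · rw [iflag, s1f]
      constructor
      · rintro ((h | ⟨j, h1, h2⟩) | ⟨j, h1, q, hq, hqt⟩)
        · exact Or.inl h
        · exact Or.inr ⟨j, h1, (hconsP j).mpr (Or.inl h2)⟩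
        · exact Or.inr ⟨j, ((t2 j).mp h1).1,
            (hconsP j).mpr (Or.inr ⟨q, hq, (t3 q j).mp hqt⟩)⟩
      · rintro (h | ⟨j, h1, h2⟩)
        · exact Or.inl (Or.inl h)
        · rcases (hconsP j).mp h2 with h | ⟨q, hq, hqt⟩
          · exact Or.inl (Or.inr ⟨j, h1, h⟩)
          · by_cases hB : pvTouch w L d p j
            · exact Or.inl (Or.inr ⟨j, h1, hB⟩)
            · exact Or.inr ⟨j, (t2 j).mpr ⟨h1, hB⟩, q, hq, (t3 q j).mpr hqt⟩

-- ---- graph cell membership in terms of roads ----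

def pvGStep (g : List (List Int)) (p : Int × Int) : List (List Int) :=
  PySem.List.pySetD (PySem.List.pySetD g p.1 (PySem.List.pyGetD g p.1 [] ++ [p.2])) p.2
    (PySem.List.pyGetD (PySem.List.pySetD g p.1 (PySem.List.pyGetD g p.1 [] ++ [p.2])) p.2 [] ++ [p.1])

lemma pvBuild_eq_gstep (n : Int) (roads : List (Int × Int)) :
    pvBuildGraph n roads = roads.foldl pvGStep (List.replicate (n + 1).toNat []) := rfl

lemma pvSetAppend_mem (L : Nat) (g : List (List Int)) (x z : Int)
    (hx : PySem.Raise.InRange L x) (hl : g.length = L) :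
    (PySem.List.pySetD g x (PySem.List.pyGetD g x [] ++ [z])).length = L ∧
    ∀ (k : Nat) (y : Int), k < L →
      (y ∈ (PySem.List.pySetD g x (PySem.List.pyGetD g x [] ++ [z])).getD k [] ↔
        (y ∈ g.getD k [] ∨ (pvNorm L x = k ∧ z = y))) := by
  have h1 : PySem.Raise.InRange g.length x := hl ▸ hx
  have hn1 : pvNorm L x < g.length := hl ▸ pvNorm_lt L x hx
  have hg' : PySem.List.pySetD g x (PySem.List.pyGetD g x [] ++ [z]) =
      g.set (pvNorm L x) (g.getD (pvNorm L x) [] ++ [z]) := by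
    rw [pvGet _ _ _ h1, pvSet _ _ _ h1, hl]
  refine ⟨by rw [hg']; simp [hl], ?_⟩
  intro k y hk
  rw [hg', pvGetD_set _ _ _ _ _ hn1]
  by_cases hk1 : k = pvNorm L x
  · rw [if_pos hk1]
    constructor
    · intro hy
      rcases List.mem_append.1 hy with h' | h'
      · exact Or.inl (hk1 ▸ h')
      · exact Or.inr ⟨hk1.symm, (List.mem_singleton.1 h').symm⟩
    · rintro (hy | ⟨-, hy⟩)
      · exact List.mem_append_left _ (hk1 ▸ hy)
      · exact List.mem_append_right _ (List.mem_singleton.2 hy.symm)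
  · rw [if_neg hk1]
    constructor
    · exact Or.inl
    · rintro (hy | ⟨hy, -⟩)
      · exact hy
      · exact absurd hy.symm hk1

lemma pvGStep_char (L : Nat) (p : Int × Int)
    (hp1 : PySem.Raise.InRange L p.1) (hp2 : PySem.Raise.InRange L p.2)
    (g : List (List Int)) (hl : g.length = L) :
    (pvGStep g p).length = L ∧
    ∀ (k : Nat) (y : Int), k < L →
      (y ∈ (pvGStep g p).getD k [] ↔
        (y ∈ g.getD k [] ∨ ((pvNorm L p.1 = k ∧ p.2 = y) ∨ (pvNorm L p.2 = k ∧ p.1 = y)))) := by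
  obtain ⟨ha1, ha2⟩ := pvSetAppend_mem L g p.1 p.2 hp1 hl
  obtain ⟨hb1, hb2⟩ := pvSetAppend_mem L
    (PySem.List.pySetD g p.1 (PySem.List.pyGetD g p.1 [] ++ [p.2])) p.2 p.1 hp2 ha1
  refine ⟨hb1, ?_⟩
  intro k y hk
  rw [show (pvGStep g p).getD k [] =
    (PySem.List.pySetD (PySem.List.pySetD g p.1 (PySem.List.pyGetD g p.1 [] ++ [p.2])) p.2
      (PySem.List.pyGetD (PySem.List.pySetD g p.1 (PySem.List.pyGetD g p.1 [] ++ [p.2])) p.2 []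
        ++ [p.1])).getD k [] from rfl]
  rw [hb2 k y hk, ha2 k y hk]
  exact or_assoc

lemma pvBuildFold_mem (L : Nat) :
    ∀ roads : List (Int × Int),
    (∀ p ∈ roads, PySem.Raise.InRange L p.1 ∧ PySem.Raise.InRange L p.2) →
    ∀ g : List (List Int), g.length = L → ∀ (k : Nat) (y : Int), k < L →
    (y ∈ (roads.foldl pvGStep g).getD k [] ↔
      y ∈ g.getD k [] ∨
        ∃ p ∈ roads, (pvNorm L p.1 = k ∧ p.2 = y) ∨ (pvNorm L p.2 = k ∧ p.1 = y)) := by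
  intro roads
  induction roads with
  | nil => intro _ g hl k y hk; simp
  | cons p t ih =>
    intro hr g hl k y hk
    have hp := hr p (List.mem_cons_self ..)
    obtain ⟨hsl, hsm⟩ := pvGStep_char L p hp.1 hp.2 g hl
    have hcons : (∃ q ∈ p :: t, (pvNorm L q.1 = k ∧ q.2 = y) ∨ (pvNorm L q.2 = k ∧ q.1 = y)) ↔
        (((pvNorm L p.1 = k ∧ p.2 = y) ∨ (pvNorm L p.2 = k ∧ p.1 = y)) ∨
         ∃ q ∈ t, (pvNorm L q.1 = k ∧ q.2 = y) ∨ (pvNorm L q.2 = k ∧ q.1 = y)) := by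
      constructor
      · rintro ⟨q, hq, hqp⟩
        rcases List.mem_cons.1 hq with rfl | hq'
        · exact Or.inl hqp
        · exact Or.inr ⟨q, hq', hqp⟩
      · rintro (h | ⟨q, hq, hqp⟩)
        · exact ⟨p, List.mem_cons_self .., h⟩
        · exact ⟨q, List.mem_cons_of_mem _ hq, hqp⟩
    rw [List.foldl_cons,
        ih (fun q hq => hr q (List.mem_cons_of_mem _ hq)) (pvGStep g p) hsl k y hk,
        hsm k y hk, hcons]
    exact or_assoc

lemma pvBuild_mem (n : Int) (roads : List (Int × Int))
    (hr : ∀ p ∈ roads, PySem.Raise.InRange (n + 1).toNat p.1 ∧ PySem.Raise.InRange (n + 1).toNat p.2)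
    (k : Nat) (y : Int) (hk : k < (n + 1).toNat) :
    y ∈ (pvBuildGraph n roads).getD k [] ↔
      ∃ p ∈ roads, (pvNorm (n + 1).toNat p.1 = k ∧ p.2 = y) ∨
                   (pvNorm (n + 1).toNat p.2 = k ∧ p.1 = y) := by
  rw [pvBuild_eq_gstep,
      pvBuildFold_mem (n + 1).toNat roads hr (List.replicate (n + 1).toNat []) (by simp) k y hk]
  simp [List.getD_eq_getElem?_getD, List.getElem?_replicate, hk]

-- frontier hit set = relaxation touch set, given the frontier = the cells of value d
lemma pvHit_iff (n : Int) (roads : List (Int × Int))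
    (hr : ∀ p ∈ roads, PySem.Raise.InRange (n + 1).toNat p.1 ∧ PySem.Raise.InRange (n + 1).toNat p.2)
    (v front : List Int) (d : Int)
    (hfr : ∀ x ∈ front, PySem.Raise.InRange (n + 1).toNat x)
    (hinv : ∀ k, k < (n + 1).toNat →
      (v.getD k 0 = d ↔ ∃ x ∈ front, pvNorm (n + 1).toNat x = k)) (j : Nat) :
    (∃ x ∈ front, ∃ y ∈ PySem.List.pyGetD (pvBuildGraph n roads) x [], pvNorm (n + 1).toNat y = j) ↔
    ∃ p ∈ roads, pvTouch v (n + 1).toNat d p j := by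
  obtain ⟨hglen, -⟩ := pvBuild_good n roads hr
  constructor
  · rintro ⟨x, hx, y, hy, hyj⟩
    have hxr : PySem.Raise.InRange (n + 1).toNat x := hfr x hx
    have hxg : PySem.Raise.InRange (pvBuildGraph n roads).length x := hglen ▸ hxr
    rw [pvGet _ _ _ hxg, hglen] at hy
    have hnx : pvNorm (n + 1).toNat x < (n + 1).toNat := pvNorm_lt _ _ hxr
    rw [pvBuild_mem n roads hr _ y hnx] at hy
    obtain ⟨p, hp, hcase⟩ := hy
    have hvd : v.getD (pvNorm (n + 1).toNat x) 0 = d := (hinv _ hnx).mpr ⟨x, hx, rfl⟩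
    rcases hcase with ⟨he1, he2⟩ | ⟨he1, he2⟩
    · exact ⟨p, hp, Or.inl ⟨by rw [he1]; exact hvd, by rw [he2]; exact hyj⟩⟩
    · exact ⟨p, hp, Or.inr ⟨by rw [he1]; exact hvd, by rw [he2]; exact hyj⟩⟩
  · rintro ⟨p, hp, hside⟩
    obtain ⟨hp1, hp2⟩ := hr p hp
    rcases hside with ⟨h1, h2⟩ | ⟨h1, h2⟩
    · have hn1 : pvNorm (n + 1).toNat p.1 < (n + 1).toNat := pvNorm_lt _ _ hp1
      obtain ⟨x, hx, hxk⟩ := (hinv _ hn1).mp h1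
      refine ⟨x, hx, p.2, ?_, h2⟩
      have hxr := hfr x hx
      have hxg : PySem.Raise.InRange (pvBuildGraph n roads).length x := hglen ▸ hxr
      rw [pvGet _ _ _ hxg, hglen]
      rw [pvBuild_mem n roads hr _ p.2 (by rw [hxk]; exact hn1)]
      exact ⟨p, hp, Or.inl ⟨hxk.symm, rfl⟩⟩
    · have hn2 : pvNorm (n + 1).toNat p.2 < (n + 1).toNat := pvNorm_lt _ _ hp2
      obtain ⟨x, hx, hxk⟩ := (hinv _ hn2).mp h1
      refine ⟨x, hx, p.1, ?_, h2⟩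
      have hxr := hfr x hx
      have hxg : PySem.Raise.InRange (pvBuildGraph n roads).length x := hglen ▸ hxr
      rw [pvGet _ _ _ hxg, hglen]
      rw [pvBuild_mem n roads hr _ p.1 (by rw [hxk]; exact hn2)]
      exact ⟨p, hp, Or.inr ⟨hxk.symm, rfl⟩⟩

-- ---- the main bridge: level BFS = edge relaxation ----

lemma pvLevelRelax (n : Int) (roads : List (Int × Int))
    (hr : ∀ p ∈ roads, PySem.Raise.InRange (n + 1).toNat p.1 ∧ PySem.Raise.InRange (n + 1).toNat p.2)
    (hg : ∀ x, PySem.Raise.InRange (n + 1).toNat x →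
      ∀ y ∈ PySem.List.pyGetD (pvBuildGraph n roads) x [], PySem.Raise.InRange (n + 1).toNat y) :
    ∀ (fR fB : Nat) (v front : List Int) (d : Int), 0 ≤ d → v.length = (n + 1).toNat →
    (∀ x ∈ front, PySem.Raise.InRange (n + 1).toNat x) →
    (∀ k, k < (n + 1).toNat →
      (v.getD k 0 = d ↔ ∃ x ∈ front, pvNorm (n + 1).toNat x = k)) →
    (∀ k, k < (n + 1).toNat → v.getD k 0 ≤ d) →
    pvCN v + 1 ≤ fB → pvCN v + 2 ≤ fR →
    pvLoopB (pvBuildGraph n roads) fB v front (d + 1) = pvLoopR roads fR v d := by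
  intro fR
  induction fR with
  | zero => intro fB v front d _ _ _ _ _ _ h; omega
  | succ g ih =>
    intro fB v front d hd hv hfr hinv hle hfB hfR
    obtain ⟨rl, rp, rflag⟩ := pvRelaxFold_char (n + 1).toNat d hd roads hr v false hv
    have hhit := fun j => pvHit_iff n roads hr v front d hfr hinv j
    have hRstep : pvLoopR roads (g + 1) v d =
        (if (roads.foldl (pvRelaxStep d) (v, false)).2 then
          pvLoopR roads g (roads.foldl (pvRelaxStep d) (v, false)).1 (d + 1)
        else (roads.foldl (pvRelaxStep d) (v, false)).1) := rfl
    rw [hRstep]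
    by_cases hex : ∃ j, v.getD j 0 = -1 ∧ ∃ p ∈ roads, pvTouch v (n + 1).toNat d p j
    · have hsf : (roads.foldl (pvRelaxStep d) (v, false)).2 = true := rflag.mpr (Or.inr hex)
      rw [if_pos (by rw [hsf])]
      obtain ⟨j0, hj01, hj02⟩ := hex
      have hj0L : j0 < (n + 1).toNat := by
        obtain ⟨p, hp, side⟩ := hj02
        rcases side with ⟨-, hj⟩ | ⟨-, hj⟩
        · exact hj ▸ pvNorm_lt _ _ (hr p hp).2
        · exact hj ▸ pvNorm_lt _ _ (hr p hp).1
      cases front with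
      | nil =>
        exfalso
        obtain ⟨p, hp, side⟩ := hj02
        rcases side with ⟨hval, -⟩ | ⟨hval, -⟩
        · obtain ⟨x, hx, -⟩ := (hinv _ (pvNorm_lt _ _ (hr p hp).1)).mp hval
          exact absurd hx (List.not_mem_nil)
        · obtain ⟨x, hx, -⟩ := (hinv _ (pvNorm_lt _ _ (hr p hp).2)).mp hval
          exact absurd hx (List.not_mem_nil)
      | cons x fs =>
        have hcnpos : 0 < pvCN v := pvCN_pos v j0 (by rw [hv]; exact hj0L) hj01
        obtain ⟨fB', rfl⟩ : ∃ fB', fB = fB' + 1 := ⟨fB - 1, by omega⟩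
        obtain ⟨pl, pp, pc⟩ := pvPassB_char (pvBuildGraph n roads) (n + 1).toNat hg (d + 1)
          (by omega) (x :: fs) hfr v hv
        obtain ⟨pl2, ⟨new, hnew, hprops, hcount⟩, -⟩ := pvPassB_spec (pvBuildGraph n roads)
          (n + 1).toNat hg (d + 1) (by omega) (x :: fs) v [] hv hfr
        have hnew' : (pvPassB (pvBuildGraph n roads) (d + 1) (v, []) (x :: fs)).2 = new := by
          simpa using hnew
        have hiff : ∀ j, (v.getD j 0 = -1 ∧ ∃ x' ∈ x :: fs,
            ∃ y ∈ PySem.List.pyGetD (pvBuildGraph n roads) x' [],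
              pvNorm (n + 1).toNat y = j) ↔
            (v.getD j 0 = -1 ∧ ∃ p ∈ roads, pvTouch v (n + 1).toNat d p j) :=
          fun j => and_congr_right (fun _ => hhit j)
        have heq : (pvPassB (pvBuildGraph n roads) (d + 1) (v, []) (x :: fs)).1 =
            (roads.foldl (pvRelaxStep d) (v, false)).1 := by
          apply pvExt _ _ (by rw [pl, rl])
          intro j hj
          rw [pp j, rp j]
          by_cases hc : v.getD j 0 = -1 ∧ ∃ x' ∈ x :: fs,
              ∃ y ∈ PySem.List.pyGetD (pvBuildGraph n roads) x' [], pvNorm (n + 1).toNat y = j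
          · rw [if_pos hc, if_pos ((hiff j).mp hc)]
          · rw [if_neg hc, if_neg (fun hx2 => hc ((hiff j).mpr hx2))]
        have hnewne : new ≠ [] := by
          intro hnil
          have := (pc j0).mpr ⟨hj01, (hhit j0).mpr hj02⟩
          rw [hnew', hnil] at this
          simp at this
        have hBstep : pvLoopB (pvBuildGraph n roads) (fB' + 1) v (x :: fs) (d + 1) =
            pvLoopB (pvBuildGraph n roads) fB'
              (pvPassB (pvBuildGraph n roads) (d + 1) (v, []) (x :: fs)).1
              (pvPassB (pvBuildGraph n roads) (d + 1) (v, []) (x :: fs)).2 (d + 1 + 1) := rfl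
        rw [hBstep, heq]
        have hrec := ih fB' (roads.foldl (pvRelaxStep d) (v, false)).1
          (pvPassB (pvBuildGraph n roads) (d + 1) (v, []) (x :: fs)).2 (d + 1)
          (by omega) rl
          (by rw [hnew']; intro z hz; exact (hprops z hz).1)
          (by
            intro k hk
            rw [rp k]
            constructor
            · intro hval
              by_cases hc : v.getD k 0 = -1 ∧ ∃ p ∈ roads, pvTouch v (n + 1).toNat d p k
              · exact (pc k).mpr ((hiff k).mpr hc)
              · rw [if_neg hc] at hval
                have := hle k hk
                omega
            · intro hz
              have hck := (hiff k).mp ((pc k).mp hz)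
              rw [if_pos hck]
          )
          (by
            intro k hk
            rw [rp k]
            by_cases hc : v.getD k 0 = -1 ∧ ∃ p ∈ roads, pvTouch v (n + 1).toNat d p k
            · rw [if_pos hc]
            · rw [if_neg hc]
              have := hle k hk
              omega)
          (by
            have hlen1 : 0 < new.length := List.length_pos_iff.2 hnewne
            rw [← heq]
            omega)
          (by
            have hlen1 : 0 < new.length := List.length_pos_iff.2 hnewne
            rw [← heq]
            omega)
        exact hrec
    · have hsf : (roads.foldl (pvRelaxStep d) (v, false)).2 = false := by
        cases hb : (roads.foldl (pvRelaxStep d) (v, false)).2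
        · rfl
        · rcases rflag.mp hb with h | h
          · exact absurd h (by simp)
          · exact absurd h hex
      rw [if_neg (by rw [hsf]; simp)]
      have hs1 : (roads.foldl (pvRelaxStep d) (v, false)).1 = v := by
        apply pvExt _ _ (by rw [rl, hv])
        intro j hj
        rw [rp j, if_neg (fun hc => hex ⟨j, hc⟩)]
      rw [hs1]
      cases front with
      | nil => exact pvLoopB_nil _ _ _ _
      | cons x fs =>
        obtain ⟨fB', rfl⟩ : ∃ fB', fB = fB' + 1 := ⟨fB - 1, by omega⟩
        obtain ⟨pl, pp, pc⟩ := pvPassB_char (pvBuildGraph n roads) (n + 1).toNat hg (d + 1)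
          (by omega) (x :: fs) hfr v hv
        have hhit' := fun j => pvHit_iff n roads hr v (x :: fs) d hfr hinv j
        have hp1 : (pvPassB (pvBuildGraph n roads) (d + 1) (v, []) (x :: fs)).1 = v := by
          apply pvExt _ _ (by rw [pl, hv])
          intro j hj
          rw [pp j, if_neg (fun hc => hex ⟨j, hc.1, (hhit' j).mp hc.2⟩)]
        have hp2 : (pvPassB (pvBuildGraph n roads) (d + 1) (v, []) (x :: fs)).2 = [] := by
          rcases hq : (pvPassB (pvBuildGraph n roads) (d + 1) (v, []) (x :: fs)).2 with _ | ⟨z, zs⟩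
          · rfl
          · exfalso
            have hzmem : ∃ y ∈ (pvPassB (pvBuildGraph n roads) (d + 1) (v, []) (x :: fs)).2,
                pvNorm (n + 1).toNat y = pvNorm (n + 1).toNat z :=
              ⟨z, by rw [hq]; exact List.mem_cons_self .., rfl⟩
            have := (pc (pvNorm (n + 1).toNat z)).mp hzmem
            exact hex ⟨pvNorm (n + 1).toNat z, this.1, (hhit' _).mp this.2⟩
        have hBstep : pvLoopB (pvBuildGraph n roads) (fB' + 1) v (x :: fs) (d + 1) =
            pvLoopB (pvBuildGraph n roads) fB'
              (pvPassB (pvBuildGraph n roads) (d + 1) (v, []) (x :: fs)).1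
              (pvPassB (pvBuildGraph n roads) (d + 1) (v, []) (x :: fs)).2 (d + 1 + 1) := rfl
        rw [hBstep, hp1, hp2]
        exact pvLoopB_nil _ _ _ _

-- ===== VERDICT (by name: the statement is the Claim_ definition above) =====
theorem solution_spec : Claim_equal_solution := by
  intro n roads sources destination hdom hpre
  obtain ⟨hroads, hdest, hsrc⟩ := hpre
  simp only [Spec_solution, solution, solution_alt]
  obtain ⟨hglen, hgel⟩ := pvBuild_good n roads hroads
  have hg : ∀ x, PySem.Raise.InRange (n + 1).toNat x →
      ∀ y ∈ PySem.List.pyGetD (pvBuildGraph n roads) x [], PySem.Raise.InRange (n + 1).toNat y := by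
    intro x hx y hy
    exact hgel _ (PySem.List.pyGetD_mem _ _ (by rw [hglen]; exact hx)) y hy
  have hdest' : PySem.Raise.InRange (List.replicate (n + 1).toNat (-1 : Int)).length destination := by
    simpa using hdest
  have hv0 : PySem.List.pySetD (List.replicate (n + 1).toNat (-1 : Int)) destination 0 =
      (List.replicate (n + 1).toNat (-1 : Int)).set (pvNorm (n + 1).toNat destination) 0 := by
    rw [pvSet _ _ _ hdest']; simp
  have hklt : pvNorm (n + 1).toNat destination < (n + 1).toNat := pvNorm_lt _ _ hdest
  have hlen0 : ((List.replicate (n + 1).toNat (-1 : Int)).set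
      (pvNorm (n + 1).toNat destination) 0).length = (n + 1).toNat := by simp
  have hget0 : ((List.replicate (n + 1).toNat (-1 : Int)).set
      (pvNorm (n + 1).toNat destination) 0).getD (pvNorm (n + 1).toNat destination) 0 = 0 := by
    rw [pvGetD_set _ _ _ _ _ (by simpa using hklt)]; simp
  have hcn := pvCN_le ((List.replicate (n + 1).toNat (-1 : Int)).set
      (pvNorm (n + 1).toNat destination) 0)
  rw [hlen0] at hcn
  have hmain := pvLoops_eq (pvBuildGraph n roads) (n + 1).toNat hg ((n + 1).toNat + 2)
    ((n + 1).toNat + 2)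
    ((List.replicate (n + 1).toNat (-1 : Int)).set (pvNorm (n + 1).toNat destination) 0)
    [destination] 1 (by omega) hlen0
    (by intro x hx
        simp only [List.mem_singleton] at hx
        subst hx
        exact ⟨hdest, by simpa using hget0⟩)
    (by simp only [List.length_singleton]; omega) (by omega)
  have hrelax := pvLevelRelax n roads hroads hg ((n + 1).toNat + 2) ((n + 1).toNat + 2)
    ((List.replicate (n + 1).toNat (-1 : Int)).set (pvNorm (n + 1).toNat destination) 0)
    [destination] 0 (by omega) hlen0
    (by intro x hx; simp only [List.mem_singleton] at hx; subst hx; exact hdest)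
    (by intro k hk
        constructor
        · intro hkv
          by_cases hc : k = pvNorm (n + 1).toNat destination
          · exact ⟨destination, List.mem_singleton.2 rfl, hc.symm⟩
          · rw [pvGetD_set _ _ _ _ _ (by simpa using hklt), if_neg hc] at hkv
            simp [List.getD_eq_getElem?_getD, List.getElem?_replicate, hk] at hkv
        · rintro ⟨x, hx, rfl⟩
          simp only [List.mem_singleton] at hx
          subst hx
          exact hget0)
    (by intro k hk
        rw [pvGetD_set _ _ _ _ _ (by simpa using hklt)]
        split_ifs with h
        · omega
        · simp [List.getD_eq_getElem?_getD, List.getElem?_replicate, hk])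
    (by omega) (by omega)
  rw [show (0:Int) + 1 = 1 from rfl] at hrelax
  rw [hv0, hmain, hrelax, PySem.List.foldl_append_singleton_eq_map]
  simp
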